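-- pv_equiv track=rewrite | github.com/buchbend/lore | lib/lore_curator/curator_c.py | _split_body_by_open_items
-- ===== SOURCE A (Python) =====
-- _OPEN_ITEMS_HEADING = "## Open items"
--
-- def _split_body_by_open_items(body: str) -> tuple[str, str, str]:
--     """Return (before, open_items_block, after).
--
--     `before` ends right before the `## Open items` heading.
--     `open_items_block` is the full `## Open items` section including heading.
--     `after` is everything from the next `## ` heading onwards.
--     If `## Open items` is absent, returns (body, "", "").
--     """
--     lines = body.splitlines(keepends=True)
--     start = None
--     for i, line in enumerate(lines):
--         if line.strip() == _OPEN_ITEMS_HEADING: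
--             start = i
--             break
--     if start is None:
--         return body, "", ""
--     end = len(lines)
--     for j in range(start + 1, len(lines)):
--         stripped = lines[j].strip()
--         if stripped.startswith("## ") and stripped != _OPEN_ITEMS_HEADING:
--             end = j
--             break
--     before = "".join(lines[:start])
--     section = "".join(lines[start:end])
--     after = "".join(lines[end:])
--     return before, section, after
-- ===== SOURCE B (Python) =====
-- def _split_body_by_open_items(body: str) -> tuple[str, str, str]:
--     """One linear pass with a before/in-section/after state machine."""
--     before, section, after = [], [], []
--     mode = 0  # 0 = before, 1 = in section, 2 = after
--     for line in body.splitlines(keepends=True):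
--         s = line.strip()
--         if mode == 0:
--             if s == "## Open items":
--                 mode = 1
--                 section.append(line)
--             else:
--                 before.append(line)
--         elif mode == 1:
--             if s.startswith("## ") and s != "## Open items":
--                 mode = 2
--                 after.append(line)
--             else:
--                 section.append(line)
--         else:
--             after.append(line)
--     if not section:
--         return body, "", ""
--     return "".join(before), "".join(section), "".join(after)
-- ===== Notes on version B (the rewrite author's own statement) =====
-- stated objective: alternative
-- what changed: Replaces A's two index-finding scans plus three list slices with a single linear pass state machine (before/in-section/after) over the kept-ends lines, accumulating the three parts directly.
import Mathlib
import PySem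

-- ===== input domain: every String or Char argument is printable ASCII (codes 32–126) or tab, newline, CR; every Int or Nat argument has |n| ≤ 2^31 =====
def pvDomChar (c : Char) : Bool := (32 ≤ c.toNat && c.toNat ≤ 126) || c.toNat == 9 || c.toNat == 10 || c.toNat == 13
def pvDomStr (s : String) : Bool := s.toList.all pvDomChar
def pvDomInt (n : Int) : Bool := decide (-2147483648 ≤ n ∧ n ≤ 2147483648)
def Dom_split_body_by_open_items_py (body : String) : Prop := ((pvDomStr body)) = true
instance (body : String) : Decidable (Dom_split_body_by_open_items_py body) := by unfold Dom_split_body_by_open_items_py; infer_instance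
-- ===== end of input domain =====

-- B replaces A's two index-finding scans and three slices with a single-pass
-- before/in-section/after state machine accumulating the three parts directly (alternative decomposition, same cost).

-- Shared helper: body.splitlines(keepends=True), hand-ported — exact on the Dom alphabet,
-- where the only line breaks are '\n', '\r' and '\r\n' (Python's extra break chars \x0b, \x0c, … lie outside Dom).
def pvSplitKeep : List Char → List (List Char)
  | [] => []
  | '\n' :: cs => ['\n'] :: pvSplitKeep cs
  | '\r' :: '\n' :: cs => ['\r', '\n'] :: pvSplitKeep cs
  | '\r' :: cs => ['\r'] :: pvSplitKeep cs
  | c :: cs =>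
    match pvSplitKeep cs with
    | [] => [[c]]
    | l :: ls => (c :: l) :: ls

def pvHeading : List Char := "## Open items".toList

-- line.strip() == "## Open items"
def pvIsHeading (l : List Char) : Bool := PySem.Chars.strip l = pvHeading

-- stripped.startswith("## ") and stripped != "## Open items"
def pvIsCloser (l : List Char) : Bool :=
  let s := PySem.Chars.strip l
  PySem.Chars.startswith s "## ".toList && s ≠ pvHeading

-- ===== PORT A =====
-- first index satisfying p (A's `for … break` loops, both searches)
def pvFindIdx (p : List Char → Bool) : List (List Char) → Option Nat
  | [] => none
  | l :: ls => if p l then some 0 else (pvFindIdx p ls).map (· + 1)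

def split_body_by_open_items_py (body : String) : String × String × String :=
  let lines := pvSplitKeep body.toList
  match pvFindIdx pvIsHeading lines with
  | none => (body, "", "")
  | some start =>
    -- second loop: for j in range(start+1, len(lines)), default end = len(lines)
    let e := match pvFindIdx pvIsCloser (lines.drop (start + 1)) with
      | none => lines.length
      | some k => start + 1 + k
    (String.ofList (PySem.Chars.join [] (lines.take start)),
     String.ofList (PySem.Chars.join [] ((lines.drop start).take (e - start))),
     String.ofList (PySem.Chars.join [] (lines.drop e)))

-- ===== PORT B =====
-- loop body of Source B: state = (mode, before, section, after)
def pvStep (st : Nat × List (List Char) × List (List Char) × List (List Char)) (line : List Char) :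
    Nat × List (List Char) × List (List Char) × List (List Char) :=
  let (mode, b, m, a) := st
  let s := PySem.Chars.strip line
  if mode = 0 then
    if s = pvHeading then (1, b, m ++ [line], a) else (0, b ++ [line], m, a)
  else if mode = 1 then
    if PySem.Chars.startswith s "## ".toList && s ≠ pvHeading then (2, b, m, a ++ [line])
    else (1, b, m ++ [line], a)
  else (2, b, m, a ++ [line])

def split_body_by_open_items_py_alt (body : String) : String × String × String :=
  let st := (pvSplitKeep body.toList).foldl pvStep (0, [], [], [])
  match st with
  | (_, b, m, a) =>
    if m = [] then (body, "", "")
    else (String.ofList (PySem.Chars.join [] b),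
          String.ofList (PySem.Chars.join [] m),
          String.ofList (PySem.Chars.join [] a))

-- ===== PRECONDITION & SPEC =====
def Spec_split_body_by_open_items_py (body : String) (out : String × String × String) : Prop := out = split_body_by_open_items_py_alt body
instance (body : String) (out : String × String × String) : Decidable (Spec_split_body_by_open_items_py body out) := by unfold Spec_split_body_by_open_items_py; infer_instance

-- ===== CLAIM (what is proved, stated in full; the proofs are below) =====
def Claim_equal_split_body_by_open_items_py : Prop := ∀ (body : String), Dom_split_body_by_open_items_py body → Spec_split_body_by_open_items_py body (split_body_by_open_items_py body)

-- ===== LEMMAS AND PROOFS =====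

-- pure versions of B's scan in modes 1 and 0 (proof-side only)
def pvScan1 : List (List Char) → List (List Char) × List (List Char)
  | [] => ([], [])
  | l :: ls =>
    if pvIsCloser l then ([], l :: ls)
    else (l :: (pvScan1 ls).1, (pvScan1 ls).2)

def pvScan0 : List (List Char) → List (List Char) × List (List Char) × List (List Char)
  | [] => ([], [], [])
  | l :: ls =>
    if pvIsHeading l then ([], l :: (pvScan1 ls).1, (pvScan1 ls).2)
    else (l :: (pvScan0 ls).1, (pvScan0 ls).2.1, (pvScan0 ls).2.2)

lemma pvStep2 (b m a : List (List Char)) (l : List Char) :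
    pvStep (2, b, m, a) l = (2, b, m, a ++ [l]) := by
  simp [pvStep]

lemma pvStep1 (b m a : List (List Char)) (l : List Char) :
    pvStep (1, b, m, a) l =
      if pvIsCloser l then (2, b, m, a ++ [l]) else (1, b, m ++ [l], a) := by
  simp [pvStep, pvIsCloser]

lemma pvStep0 (b m a : List (List Char)) (l : List Char) :
    pvStep (0, b, m, a) l =
      if pvIsHeading l then (1, b, m ++ [l], a) else (0, b ++ [l], m, a) := by
  simp [pvStep, pvIsHeading]

lemma pvFoldl2 (ls : List (List Char)) : ∀ b m a,
    ls.foldl pvStep (2, b, m, a) = (2, b, m, a ++ ls) := by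
  induction ls with
  | nil => intro b m a; simp
  | cons l ls ih =>
    intro b m a
    simp only [List.foldl_cons, pvStep2, ih]
    simp

lemma pvFoldl1 (ls : List (List Char)) : ∀ b m a, ∃ mo,
    ls.foldl pvStep (1, b, m, a) = (mo, b, m ++ (pvScan1 ls).1, a ++ (pvScan1 ls).2) := by
  induction ls with
  | nil => intro b m a; exact ⟨1, by simp [pvScan1]⟩
  | cons l ls ih =>
    intro b m a
    by_cases h : pvIsCloser l = true
    · refine ⟨2, ?_⟩
      simp only [List.foldl_cons, pvStep1, if_pos h, pvFoldl2, pvScan1]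
      simp
    · obtain ⟨mo, hmo⟩ := ih b (m ++ [l]) a
      refine ⟨mo, ?_⟩
      simp only [List.foldl_cons, pvStep1, if_neg h, hmo, pvScan1]
      simp

lemma pvFoldl0 (ls : List (List Char)) : ∀ b m a, ∃ mo,
    ls.foldl pvStep (0, b, m, a) = (mo, b ++ (pvScan0 ls).1, m ++ (pvScan0 ls).2.1, a ++ (pvScan0 ls).2.2) := by
  induction ls with
  | nil => intro b m a; exact ⟨0, by simp [pvScan0]⟩
  | cons l ls ih =>
    intro b m a
    by_cases h : pvIsHeading l = true
    · obtain ⟨mo, hmo⟩ := pvFoldl1 ls b (m ++ [l]) a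
      refine ⟨mo, ?_⟩
      simp only [List.foldl_cons, pvStep0, if_pos h, hmo, pvScan0]
      simp
    · obtain ⟨mo, hmo⟩ := ih (b ++ [l]) m a
      refine ⟨mo, ?_⟩
      simp only [List.foldl_cons, pvStep0, if_neg h, hmo, pvScan0]
      simp

lemma pvScan1_eq (ls : List (List Char)) :
    pvScan1 ls = match pvFindIdx pvIsCloser ls with
      | none => (ls, [])
      | some k => (ls.take k, ls.drop k) := by
  induction ls with
  | nil => simp [pvScan1, pvFindIdx]
  | cons l ls ih =>
    by_cases h : pvIsCloser l = true
    · simp [pvScan1, pvFindIdx, h]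
    · simp only [pvScan1, pvFindIdx, if_neg h, Bool.not_eq_true] at *
      cases hf : pvFindIdx pvIsCloser ls with
      | none => simp [hf] at ih ⊢; simp [ih]
      | some k => simp [hf] at ih ⊢; simp [ih]

lemma pvScan0_eq_none {ls : List (List Char)} (h : pvFindIdx pvIsHeading ls = none) :
    pvScan0 ls = (ls, [], []) := by
  induction ls with
  | nil => simp [pvScan0]
  | cons l ls ih =>
    simp only [pvFindIdx] at h
    by_cases hl : pvIsHeading l = true
    · simp [hl] at h
    · simp only [if_neg hl, Option.map_eq_none_iff] at h
      simp [pvScan0, hl, ih h]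

lemma pvScan0_eq_some {ls : List (List Char)} : ∀ {i : Nat},
    pvFindIdx pvIsHeading ls = some i →
    ∃ hd rest, ls.drop i = hd :: rest ∧
      pvScan0 ls = (ls.take i, hd :: (pvScan1 rest).1, (pvScan1 rest).2) := by
  induction ls with
  | nil => intro i h; simp [pvFindIdx] at h
  | cons l ls ih =>
    intro i h
    simp only [pvFindIdx] at h
    by_cases hl : pvIsHeading l = true
    · simp only [if_pos hl, Option.some.injEq] at h
      subst h
      exact ⟨l, ls, by simp, by simp [pvScan0, hl]⟩
    · simp only [if_neg hl, Option.map_eq_some_iff] at h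
      obtain ⟨j, hj, rfl⟩ := h
      obtain ⟨hd, rest, hdrop, hscan⟩ := ih hj
      exact ⟨hd, rest, by simpa using hdrop, by simp [pvScan0, hl, hscan]⟩

-- ===== VERDICT (by name: the statement is the Claim_ definition above) =====
theorem split_body_by_open_items_py_spec : Claim_equal_split_body_by_open_items_py := by
  intro body _
  unfold Spec_split_body_by_open_items_py split_body_by_open_items_py split_body_by_open_items_py_alt
  dsimp only
  generalize pvSplitKeep body.toList = ls
  obtain ⟨mo, hmo⟩ := pvFoldl0 ls [] [] []
  simp only [List.nil_append] at hmo
  cases hf : pvFindIdx pvIsHeading ls with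
  | none =>
    rw [pvScan0_eq_none hf] at hmo
    simp [hmo]
  | some i =>
    obtain ⟨hd, rest, hdrop, hscan⟩ := pvScan0_eq_some hf
    rw [hscan] at hmo
    have hrest : ls.drop (i + 1) = rest := by
      rw [← List.drop_drop, hdrop]; rfl
    have hlen : i + 1 + rest.length = ls.length := by
      have := congrArg List.length hdrop
      simp [List.length_drop] at this
      omega
    simp only [hmo]
    rw [hrest]
    cases hc : pvFindIdx pvIsCloser rest with
    | none =>
      have h1 : pvScan1 rest = (rest, []) := by rw [pvScan1_eq, hc]
      rw [h1]
      have htake : (ls.drop i).take (ls.length - i) = hd :: rest := by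
        rw [hdrop]
        have h2 : ls.length - i = rest.length + 1 := by omega
        simp [h2]
      have hdropall : ls.drop ls.length = ([] : List (List Char)) := by simp
      simp [htake, hdropall]
    | some k =>
      have h1 : pvScan1 rest = (rest.take k, rest.drop k) := by rw [pvScan1_eq, hc]
      rw [h1]
      have htake : (ls.drop i).take (i + 1 + k - i) = hd :: rest.take k := by
        rw [hdrop]
        have h2 : i + 1 + k - i = k + 1 := by omega
        simp [h2]
      have hdrope : ls.drop (i + 1 + k) = rest.drop k := by
        rw [← hrest, List.drop_drop]
      simp [htake, hdrope]
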